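-- pv_equiv track=rewrite | github.com/Paradox-455M/local-code-agent | agent/cli.py | _is_refactoring_task
-- ===== SOURCE A (Python) =====
-- def _is_refactoring_task(task: str) -> bool:
--     """Detect if task is a refactoring operation."""
--     task_lower = task.lower()
--     refactoring_keywords = [
--         "rename",
--         "extract",
--         "inline",
--         "move",
--         "refactor",
--     ]
--     return any(keyword in task_lower for keyword in refactoring_keywords)
-- ===== SOURCE B (Python) =====
-- def _is_refactoring_task(task: str) -> bool:
--     """Detect if task is a refactoring operation.
--
--     Single left-to-right pass: at each position check whether one of the
--     keywords starts there, instead of five independent substring scans.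
--     """
--     t = task.lower()
--     kws = ("rename", "extract", "inline", "move", "refactor")
--     return any(t.startswith(k, i) for i in range(len(t) + 1) for k in kws)
-- ===== Notes on version B (the rewrite author's own statement) =====
-- stated objective: alternative
-- what changed: Replaced five independent substring-containment scans of the lowered task with a single left-to-right pass that checks at each position whether any of the five keywords starts there.
import Mathlib
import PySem

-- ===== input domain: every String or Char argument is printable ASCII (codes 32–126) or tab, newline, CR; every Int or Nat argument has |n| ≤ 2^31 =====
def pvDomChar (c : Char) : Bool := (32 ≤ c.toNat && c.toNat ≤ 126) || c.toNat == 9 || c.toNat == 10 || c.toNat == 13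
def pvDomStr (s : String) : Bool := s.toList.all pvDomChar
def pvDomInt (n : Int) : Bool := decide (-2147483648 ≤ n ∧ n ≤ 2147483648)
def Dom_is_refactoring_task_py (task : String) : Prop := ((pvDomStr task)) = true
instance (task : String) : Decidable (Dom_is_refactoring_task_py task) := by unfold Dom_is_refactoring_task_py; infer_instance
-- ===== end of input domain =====

-- B replaces five independent substring scans with one left-to-right pass
-- checking at each position whether any keyword starts there (objective: alternative).


-- ===== PORT A =====
-- task_lower = task.lower(); any(keyword in task_lower for keyword in [...])
def is_refactoring_task_py (task : String) : Bool :=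
  let task_lower := PySem.Str.lower task
  (["rename", "extract", "inline", "move", "refactor"] : List String).any
    (fun keyword => PySem.Str.isIn keyword task_lower)

-- ===== PORT B =====
-- the five keywords, as char lists
def pvKws : List (List Char) :=
  ["rename".toList, "extract".toList, "inline".toList, "move".toList, "refactor".toList]

-- t.startswith(k, i) for every keyword k, at the suffix beginning at position i
-- (ported by hand: startswith-at-offset is prefix-of-suffix; exact for ASCII)
def pvStartsAny (cs : List Char) : Bool := pvKws.any (fun k => k.isPrefixOf cs)

-- the single left-to-right pass over positions i = 0..len(t) (suffix recursion)
def pvScan : List Char → Bool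
  | [] => pvStartsAny []
  | c :: cs => pvStartsAny (c :: cs) || pvScan cs

def is_refactoring_task_py_alt (task : String) : Bool :=
  pvScan (PySem.Chars.lower task.toList)

-- ===== PRECONDITION & SPEC =====
def Spec_is_refactoring_task_py (task : String) (out : Bool) : Prop := out = is_refactoring_task_py_alt task
instance (task : String) (out : Bool) : Decidable (Spec_is_refactoring_task_py task out) := by unfold Spec_is_refactoring_task_py; infer_instance

-- ===== CLAIM (what is proved, stated in full; the proofs are below) =====
def Claim_equal_is_refactoring_task_py : Prop := ∀ (task : String), Dom_is_refactoring_task_py task → Spec_is_refactoring_task_py task (is_refactoring_task_py task)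

-- ===== LEMMAS AND PROOFS =====

-- the scan finds exactly the inputs having some keyword as an infix
theorem pvScan_iff (cs : List Char) : pvScan cs = true ↔ ∃ k ∈ pvKws, k <:+: cs := by
  induction cs with
  | nil =>
    simp only [pvScan]
    constructor
    · intro h; exact absurd h (by decide)
    · rintro ⟨k, hk, hinf⟩
      have : k = [] := List.eq_nil_of_infix_nil hinf
      subst this
      simp [pvKws] at hk
  | cons c cs ih =>
    simp only [pvScan, Bool.or_eq_true, ih, pvStartsAny, List.any_eq_true]
    constructor
    · rintro (⟨k, hk, hp⟩ | ⟨k, hk, hinf⟩)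
      · exact ⟨k, hk, (List.isPrefixOf_iff_prefix.mp hp).isInfix⟩
      · exact ⟨k, hk, List.infix_cons_iff.mpr (Or.inr hinf)⟩
    · rintro ⟨k, hk, hinf⟩
      rcases List.infix_cons_iff.mp hinf with hp | hinf'
      · exact Or.inl ⟨k, hk, List.isPrefixOf_iff_prefix.mpr hp⟩
      · exact Or.inr ⟨k, hk, hinf'⟩

-- A's five 'in' tests find the same property
theorem pvA_iff (task : String) :
    is_refactoring_task_py task = true ↔ ∃ k ∈ pvKws, k <:+: PySem.Chars.lower task.toList := by
  simp only [is_refactoring_task_py, List.any_eq_true, PySem.Str.isIn_eq,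
    PySem.Str.toList_lower, PySem.Chars.isIn_iff_infix]
  constructor
  · rintro ⟨s, hs, hinf⟩
    refine ⟨s.toList, ?_, hinf⟩
    fin_cases hs <;> simp [pvKws]
  · rintro ⟨k, hk, hinf⟩
    simp only [pvKws, List.mem_cons, List.not_mem_nil, or_false] at hk
    rcases hk with h | h | h | h | h <;> subst h
    · exact ⟨"rename", by simp, hinf⟩
    · exact ⟨"extract", by simp, hinf⟩
    · exact ⟨"inline", by simp, hinf⟩
    · exact ⟨"move", by simp, hinf⟩
    · exact ⟨"refactor", by simp, hinf⟩

-- ===== VERDICT (by name: the statement is the Claim_ definition above) =====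
theorem is_refactoring_task_py_spec : Claim_equal_is_refactoring_task_py := by
  intro task _
  unfold Spec_is_refactoring_task_py is_refactoring_task_py_alt
  rw [Bool.eq_iff_iff, pvA_iff, pvScan_iff]
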